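-- pv_equiv track=rewrite | github.com/Serious777/BioDataWebBackEnd | flaskr/qpAdm_tools_v0.5/utils.py | c2
-- ===== SOURCE A (Python) =====
-- def combination(li):
--     if "# Combination" in li or "#Combination" in li or "# combination" in li or "#combination" in li:
--         new_li = []
--         tmp_li = []
--         for i in li:
--             if "#" not in i:
--                 tmp_li.append(i)
--             else:
--                 if tmp_li:
--                     new_li.append(tmp_li)
--                 tmp_li = []
--         new_li.append(tmp_li)
--         return new_li
--     else:
--         return False
--
-- def remove_comment(li):
--     new_li = []
--     for i in li:
--         if '#' not in i:
--             new_li.append(i)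
--     return new_li
--
-- def count_cls(cls_li, *li):
--     count = 0
--     for i in li:
--         if i in cls_li:
--             count += 1
--     return count
--
-- def c2(li):
--     cls_li = combination(li)
--     li = remove_comment(li)  # 去除'#'号
--     result = []
--     for i in range(len(li) - 1):
--         for j in range(i + 1, len(li)):
--             if cls_li:
--                 for cls in cls_li:
--                     if count_cls(cls, li[i], li[j]) > 1:
--                         break
--                 else:
--                     result.append([li[i], li[j]])
--             else:
--                 result.append([li[i], li[j]])
--     return result
-- ===== SOURCE B (Python) =====
-- def c2(li):
--     markers = ("# Combination", "#Combination", "# combination", "#combination")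
--     groups = []
--     if any(m in li for m in markers):
--         cur = []
--         for x in li:
--             if '#' in x:
--                 if cur:
--                     groups.append(cur)
--                 cur = []
--             else:
--                 cur.append(x)
--         if cur:
--             groups.append(cur)
--     vals = [x for x in li if '#' not in x]
--     tags = [[g for g in groups if x in g] for x in vals]
--     n = len(vals)
--     return [[vals[i], vals[j]]
--             for i in range(n)
--             for j in range(i + 1, n)
--             if all(g not in tags[j] for g in tags[i])]
-- ===== Notes on version B (the rewrite author's own statement) =====
-- stated objective: alternative
-- what changed: B precomputes for each comment-free element the list of combination groups containing it (one tagging pass), then emits a pair exactly when the two tag lists are disjoint, instead of A's per-pair count_cls rescan of every group inside the nested pair loop.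
import Mathlib
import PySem

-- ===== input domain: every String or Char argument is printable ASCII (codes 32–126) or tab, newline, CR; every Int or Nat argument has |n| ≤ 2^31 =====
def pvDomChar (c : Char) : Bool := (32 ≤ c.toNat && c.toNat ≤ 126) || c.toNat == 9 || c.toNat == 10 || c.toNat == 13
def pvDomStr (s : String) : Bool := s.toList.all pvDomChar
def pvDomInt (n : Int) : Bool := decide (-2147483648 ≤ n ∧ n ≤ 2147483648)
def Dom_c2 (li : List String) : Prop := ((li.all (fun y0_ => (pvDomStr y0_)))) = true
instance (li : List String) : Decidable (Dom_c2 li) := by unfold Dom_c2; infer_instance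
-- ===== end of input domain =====

-- B replaces A's per-pair rescan of every combination group (count_cls inside the j-loop) by a
-- precomputed per-element list of the groups containing it, emitting a pair when the two tag lists
-- are disjoint; objective: alternative (same result, different decomposition).

-- ===== PORT A =====
def pvCombination (li : List String) : Option (List (List String)) :=
  if li.contains "# Combination" || li.contains "#Combination" || li.contains "# combination" || li.contains "#combination" then
    let st := li.foldl (fun (st : List (List String) × List String) i =>
      if !(PySem.Str.isIn "#" i) then (st.1, st.2 ++ [i])
      else (if st.2.isEmpty then st.1 else st.1 ++ [st.2], [])) ([], [])
    some (st.1 ++ [st.2])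
  else none

def pvRemoveComment (li : List String) : List String :=
  li.foldl (fun acc i => if !(PySem.Str.isIn "#" i) then acc ++ [i] else acc) []

def pvCountCls (cls : List String) (args : List String) : Int :=
  args.foldl (fun c i => if cls.contains i then c + 1 else c) 0

def c2 (li : List String) : List (List String) :=
  let cls_li := pvCombination li
  let li' := pvRemoveComment li
  (PySem.List.pyRange 0 ((li'.length : Int) - 1) 1).foldl (fun result i =>
    (PySem.List.pyRange (i + 1) (li'.length : Int) 1).foldl (fun result j =>
      match cls_li with
      | some groups =>
        if groups.any (fun cls => 1 < pvCountCls cls [PySem.List.pyGetD li' i "", PySem.List.pyGetD li' j ""]) then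
          result
        else
          result ++ [[PySem.List.pyGetD li' i "", PySem.List.pyGetD li' j ""]]
      | none => result ++ [[PySem.List.pyGetD li' i "", PySem.List.pyGetD li' j ""]]) result) []

-- ===== PORT B =====
def pvGroups (li : List String) : List (List String) :=
  if (["# Combination", "#Combination", "# combination", "#combination"] : List String).any (fun m => li.contains m) then
    let st := li.foldl (fun (st : List (List String) × List String) x =>
      if PySem.Str.isIn "#" x then (if st.2.isEmpty then st.1 else st.1 ++ [st.2], [])
      else (st.1, st.2 ++ [x])) ([], [])
    if st.2.isEmpty then st.1 else st.1 ++ [st.2]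
  else []

def c2_alt (li : List String) : List (List String) :=
  let groups := pvGroups li
  let vals := li.filter (fun x => !(PySem.Str.isIn "#" x))
  let tags := vals.map (fun x => groups.filter (fun g => g.contains x))
  let n : Int := vals.length
  (PySem.List.pyRange 0 n 1).flatMap (fun i =>
    ((PySem.List.pyRange (i + 1) n 1).filter (fun j =>
        (PySem.List.pyGetD tags i []).all (fun g => !((PySem.List.pyGetD tags j []).contains g)))).map
      (fun j => [PySem.List.pyGetD vals i "", PySem.List.pyGetD vals j ""]))

-- ===== PRECONDITION & SPEC =====
def Spec_c2 (li : List String) (out : List (List String)) : Prop := out = c2_alt li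
instance (li : List String) (out : List (List String)) : Decidable (Spec_c2 li out) := by unfold Spec_c2; infer_instance

-- ===== CLAIM (what is proved, stated in full; the proofs are below) =====
def Claim_equal_c2 : Prop := ∀ (li : List String), Dom_c2 li → Spec_c2 li (c2 li)

-- ===== LEMMAS AND PROOFS =====

theorem pv_removeComment_eq (li : List String) :
    pvRemoveComment li = li.filter (fun x => !(PySem.Str.isIn "#" x)) := by
  simpa [pvRemoveComment] using
    PySem.List.foldl_append_if_eq_filter (fun x => !(PySem.Str.isIn "#" x)) li []

theorem pv_cond_eq (li : List String) :
    ((["# Combination", "#Combination", "# combination", "#combination"] : List String).any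
        (fun m => li.contains m)) =
    (li.contains "# Combination" || li.contains "#Combination" || li.contains "# combination" || li.contains "#combination") := by
  simp [Bool.or_assoc]

theorem pv_fold_eq (li : List String) :
    li.foldl (fun (st : List (List String) × List String) i =>
      if !(PySem.Str.isIn "#" i) then (st.1, st.2 ++ [i])
      else (if st.2.isEmpty then st.1 else st.1 ++ [st.2], [])) ([], []) =
    li.foldl (fun (st : List (List String) × List String) x =>
      if PySem.Str.isIn "#" x then (if st.2.isEmpty then st.1 else st.1 ++ [st.2], [])
      else (st.1, st.2 ++ [x])) ([], []) := by
  apply PySem.List.foldl_congr_mem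
  intro st x _
  cases h : PySem.Str.isIn "#" x
  · rfl
  · rfl

theorem pv_count_eq (cls : List String) (x y : String) :
    (decide (1 < pvCountCls cls [x, y])) = (cls.contains x && cls.contains y) := by
  by_cases hx : x ∈ cls <;> by_cases hy : y ∈ cls <;>
    simp [pvCountCls, hx, hy]

theorem pv_disjoint_eq (groups : List (List String)) (x y : String) :
    ((groups.filter (fun g => g.contains x)).all
        (fun g => !((groups.filter (fun g => g.contains y)).contains g))) =
    !(groups.any (fun cls => cls.contains x && cls.contains y)) := by
  rw [Bool.eq_iff_iff]
  simp only [List.all_eq_true, Bool.not_eq_eq_eq_not, Bool.not_true, List.any_eq_false, Bool.and_eq_true, List.mem_filter, List.contains_eq_mem,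
    decide_eq_true_eq, decide_eq_false_iff_not, not_and]
  constructor
  · intro h c hc hx
    exact h c ⟨hc, hx⟩ hc
  · intro h c hc _
    exact h c hc.1 hc.2

-- the trailing group A appends even when empty can never exclude a pair
theorem pv_pair_pred (G : List (List String)) (c : List String) (x y : String) :
    (((if c.isEmpty then G else G ++ [c]).filter (fun g => g.contains x)).all
      (fun g => !(((if c.isEmpty then G else G ++ [c]).filter (fun g => g.contains y)).contains g))) =
    !((G ++ [c]).any (fun cls => decide (1 < pvCountCls cls [x, y]))) := by
  rw [pv_disjoint_eq]
  congr 1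
  rw [PySem.List.any_congr_mem (g := fun cls => cls.contains x && cls.contains y)
        (fun cls _ => pv_count_eq cls x y)]
  cases hc : c.isEmpty
  · simp
  · have hcn : c = [] := List.isEmpty_iff.mp hc
    subst hcn
    simp

theorem pv_tag_get (vals : List String) (groups : List (List String)) (i : Int)
    (h0 : 0 ≤ i) (h1 : i < (vals.length : Int)) :
    PySem.List.pyGetD (vals.map (fun x => groups.filter (fun g => g.contains x))) i [] =
    groups.filter (fun g => g.contains (PySem.List.pyGetD vals i "")) := by
  rw [PySem.List.pyGetD_eq_getElem _ _ h0 (by simpa using h1),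
      PySem.List.pyGetD_eq_getElem _ _ h0 h1, List.getElem_map]

theorem pv_flatMap_range_pred (n : Int) (g : Int → List (List String)) (h : g (n - 1) = []) :
    (PySem.List.pyRange 0 n 1).flatMap g = (PySem.List.pyRange 0 (n - 1) 1).flatMap g := by
  by_cases hn : n ≤ 0
  · rw [PySem.List.pyRange_one_eq_nil hn, PySem.List.pyRange_one_eq_nil (by omega)]
  · have hsplit : PySem.List.pyRange 0 n 1 = PySem.List.pyRange 0 (n - 1) 1 ++ [n - 1] := by
      have := PySem.List.pyRange_one_succ_right (a := 0) (b := n - 1) (by omega)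
      simpa [sub_add_cancel] using this
    rw [hsplit, List.flatMap_append]
    simp [h]

-- ===== VERDICT (by name: the statement is the Claim_ definition above) =====
theorem c2_spec : Claim_equal_c2 := by
  intro li _
  show c2 li = c2_alt li
  simp only [c2, c2_alt, pvCombination, pvGroups, pv_cond_eq, pv_fold_eq, pv_removeComment_eq]
  set vals := li.filter (fun x => !(PySem.Str.isIn "#" x)) with hvals
  set st := li.foldl (fun (st : List (List String) × List String) x =>
      if PySem.Str.isIn "#" x then (if st.2.isEmpty then st.1 else st.1 ++ [st.2], [])
      else (st.1, st.2 ++ [x])) ([], []) with hst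
  set n : Int := (vals.length : Int) with hn
  by_cases hc : (li.contains "# Combination" || li.contains "#Combination" ||
      li.contains "# combination" || li.contains "#combination") = true
  · simp only [hc, if_true]
    rw [PySem.List.foldl_congr_mem _ _
        (fun result i => result ++
          (((PySem.List.pyRange (i + 1) n 1).filter
              (fun j => !((st.1 ++ [st.2]).any (fun cls => decide (1 < pvCountCls cls
                [PySem.List.pyGetD vals i "", PySem.List.pyGetD vals j ""]))))).map
            (fun j => [PySem.List.pyGetD vals i "", PySem.List.pyGetD vals j ""])) ) _
        (by
          intro acc i _
          have h1 := PySem.List.foldl_congr_mem (PySem.List.pyRange (i + 1) n 1)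
            (fun result j =>
              if ((st.1 ++ [st.2]).any (fun cls => decide (1 < pvCountCls cls
                  [PySem.List.pyGetD vals i "", PySem.List.pyGetD vals j ""]))) then result
              else result ++ [[PySem.List.pyGetD vals i "", PySem.List.pyGetD vals j ""]])
            (fun result j =>
              if !((st.1 ++ [st.2]).any (fun cls => decide (1 < pvCountCls cls
                  [PySem.List.pyGetD vals i "", PySem.List.pyGetD vals j ""]))) then
                result ++ [[PySem.List.pyGetD vals i "", PySem.List.pyGetD vals j ""]]
              else result) acc
            (by
              intro acc2 j _
              cases h : (st.1 ++ [st.2]).any (fun cls => decide (1 < pvCountCls cls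
                [PySem.List.pyGetD vals i "", PySem.List.pyGetD vals j ""])) <;> simp [h])
          rw [h1, PySem.List.foldl_append_if]),
      PySem.List.foldl_append_eq_flatMap]
    rw [pv_flatMap_range_pred n _ (by
      rw [PySem.List.pyRange_one_eq_nil (by omega)]
      simp)]
    simp only [List.nil_append]
    apply List.flatMap_congr
    intro i hi
    have hib := PySem.List.mem_pyRange_one.mp hi
    apply congrArg
    apply List.filter_congr
    intro j hj
    have hjb := PySem.List.mem_pyRange_one.mp hj
    rw [pv_tag_get vals _ i (by omega) (by omega),
        pv_tag_get vals _ j (by omega) (by omega),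
        pv_pair_pred]
  · simp only [hc, Bool.false_eq_true, if_false]
    rw [PySem.List.foldl_congr_mem _ _
        (fun result i => result ++
          ((PySem.List.pyRange (i + 1) n 1).map
            (fun j => [PySem.List.pyGetD vals i "", PySem.List.pyGetD vals j ""])) ) _
        (fun acc i _ => PySem.List.foldl_append_singleton_eq_map _ _ _),
      PySem.List.foldl_append_eq_flatMap]
    rw [pv_flatMap_range_pred n _ (by
      rw [PySem.List.pyRange_one_eq_nil (by omega)]
      simp)]
    simp only [List.nil_append]
    apply List.flatMap_congr
    intro i hi
    have hib := PySem.List.mem_pyRange_one.mp hi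
    rw [pv_tag_get vals [] i (by omega) (by omega)]
    simp
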